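-- pv_equiv track=rewrite | github.com/damani42/import-hacking-fixer | import_hacking_fixer/core.py | find_import_block
-- ===== SOURCE A (Python) =====
-- from typing import List
-- from typing import Optional
-- from typing import Tuple
--
-- def find_import_block(lines: List[str]) -> Optional[Tuple[int, int]]:
--     """Find the start and end indices of the contiguous block of import statements."""
--     start: Optional[int] = None
--     end: Optional[int] = None
--     in_import_block = False
--
--     for i, line in enumerate(lines):
--         stripped = line.strip()
--
--         # Check if this is an import line
--         if stripped.startswith('import ') or stripped.startswith('from '):
--             if start is None:
--                 start = i
--             end = i + 1
--             in_import_block = True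
--         elif stripped == '':
--             # Empty line - continue if we're in an import block
--             if in_import_block:
--                 continue
--         elif in_import_block:
--             # Non-empty, non-import line - end of import block
--             break
--
--     return (start, end) if start is not None and end is not None else None
-- ===== SOURCE B (Python) =====
-- def find_import_block(lines):
--     """Index-list algorithm: collect all import line indices, then chain
--     consecutive import indices whose gaps contain only blank lines."""
--     def is_import(line):
--         s = line.strip()
--         return s.startswith('import ') or s.startswith('from ')
--
--     imports = [i for i, line in enumerate(lines) if is_import(line)]
--     if not imports:
--         return None
--     start = imports[0]
--     end = start + 1
--     for p, q in zip(imports, imports[1:]):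
--         if any(line.strip() != '' for line in lines[p + 1:q]):
--             break
--         end = q + 1
--     return (start, end)
-- ===== Notes on version B (the rewrite author's own statement) =====
-- stated objective: alternative
-- what changed: Replaces A's single flag-driven scan carrying (start, end, in_import_block) state with an index-list algorithm: build the list of all import line indices once, then chain consecutive indices, extending end only while the gap between them contains no non-blank line.
import Mathlib
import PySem

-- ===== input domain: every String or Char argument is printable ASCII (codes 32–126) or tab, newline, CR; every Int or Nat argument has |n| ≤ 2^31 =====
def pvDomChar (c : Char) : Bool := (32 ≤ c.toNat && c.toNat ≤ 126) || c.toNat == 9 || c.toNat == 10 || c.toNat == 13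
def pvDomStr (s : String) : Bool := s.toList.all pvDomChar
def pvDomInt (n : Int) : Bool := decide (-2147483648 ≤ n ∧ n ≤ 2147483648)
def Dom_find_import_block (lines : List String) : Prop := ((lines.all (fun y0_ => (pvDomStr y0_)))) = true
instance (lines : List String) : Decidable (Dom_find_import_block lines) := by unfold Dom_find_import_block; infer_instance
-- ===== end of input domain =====

-- B replaces A's flag-driven scan by an index-list algorithm: collect all import
-- line indices once, then chain consecutive indices whose gaps are all blank
-- (same O(n) cost, "alternative"); return value only, no mutation.

-- ===== PORT A =====
-- A's single for-loop: state (start, end, in_import_block), i the enumerate counter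
def pvLoopA : List String → Nat → Option Nat → Option Nat → Bool → Option (Int × Int)
  | [], _, start?, end?, _ =>
      match start?, end? with
      | some s, some e => some ((s : Int), (e : Int))
      | _, _ => none
  | line :: rest, i, start?, end?, inb =>
      let stripped := PySem.Str.strip line
      if PySem.Str.startswith stripped "import " || PySem.Str.startswith stripped "from " then
        pvLoopA rest (i + 1) (some (start?.getD i)) (some (i + 1)) true
      else if stripped == "" then
        pvLoopA rest (i + 1) start? end? inb
      else if inb then
        -- break: fall through to the final return
        match start?, end? with
        | some s, some e => some ((s : Int), (e : Int))
        | _, _ => none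
      else
        pvLoopA rest (i + 1) start? end? inb

def find_import_block (lines : List String) : Option (Int × Int) :=
  pvLoopA lines 0 none none false

-- ===== PORT B =====
def pvIsImport (line : String) : Bool :=
  let s := PySem.Str.strip line
  PySem.Str.startswith s "import " || PySem.Str.startswith s "from "

-- imports = [i for i, line in enumerate(lines) if is_import(line)]
def pvImports (lines : List String) : List Int :=
  ((PySem.List.enumerate lines).filter (fun p => pvIsImport p.2)).map (·.1)

-- 'for p, q in zip(imports, imports[1:]): if any(... lines[p+1:q]): break; end = q + 1'
def pvPairLoop (lines : List String) : List (Int × Int) → Int → Int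
  | [], e => e
  | (p, q) :: rest, e =>
      if (PySem.List.slice lines (some (p + 1)) (some q)).any
           (fun l => PySem.Str.strip l != "") then e
      else pvPairLoop lines rest (q + 1)

def find_import_block_alt (lines : List String) : Option (Int × Int) :=
  let imports := pvImports lines
  match imports with
  | [] => none
  | s :: restIdx =>
      some (s, pvPairLoop lines (imports.zip restIdx) (s + 1))

-- ===== PRECONDITION & SPEC =====
def Spec_find_import_block (lines : List String) (out : Option (Int × Int)) : Prop := out = find_import_block_alt lines
instance (lines : List String) (out : Option (Int × Int)) : Decidable (Spec_find_import_block lines out) := by unfold Spec_find_import_block; infer_instance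

-- ===== CLAIM (what is proved, stated in full; the proofs are below) =====
def Claim_equal_find_import_block : Prop := ∀ (lines : List String), Dom_find_import_block lines → Spec_find_import_block lines (find_import_block lines)

-- ===== LEMMAS AND PROOFS =====

-- proof-side: import indices of a suffix, counting from i (Nat form of pvImports)
def pvImportsF : List String → Nat → List Nat
  | [], _ => []
  | l :: r, i => if pvIsImport l then i :: pvImportsF r (i + 1) else pvImportsF r (i + 1)

-- proof-side: the consecutive pairs zip(imports, imports[1:]) with previous element p
def pvPairsI : Int → List Int → List (Int × Int)
  | _, [] => []
  | p, q :: r => (p, q) :: pvPairsI q r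

theorem pvZip_eq_pairsI : ∀ (r : List Int) (p : Int), (p :: r).zip r = pvPairsI p r := by
  intro r
  induction r with
  | nil => intro p; simp [pvPairsI]
  | cons q r' ih => intro p; simp [pvPairsI, List.zip, ← ih q]

theorem pvImports_eq (lines : List String) :
    ∀ i : Nat, ((PySem.List.enumerate lines (i : Int)).filter (fun p => pvIsImport p.2)).map (·.1)
      = (pvImportsF lines i).map (fun n : Nat => (n : Int)) := by
  induction lines with
  | nil => intro i; simp [PySem.List.enumerate_nil, pvImportsF]
  | cons l r ih =>
    intro i
    rw [PySem.List.enumerate_cons]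
    have e : (i : Int) + 1 = ((i + 1 : Nat) : Int) := by push_cast; ring
    rw [e, List.filter_cons]
    by_cases h : pvIsImport l
    · rw [if_pos (by simpa using h), List.map_cons, ih (i + 1)]
      simp [pvImportsF, h]
    · rw [if_neg (by simpa using h), ih (i + 1)]
      simp [pvImportsF, h]

theorem pvImportsF_ge (ls : List String) : ∀ i, ∀ q ∈ pvImportsF ls i, i ≤ q := by
  induction ls with
  | nil => simp [pvImportsF]
  | cons l r ih =>
    intro i q hq
    unfold pvImportsF at hq
    split at hq
    · rcases List.mem_cons.mp hq with h | h
      · omega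
      · have := ih (i + 1) q h; omega
    · have := ih (i + 1) q hq; omega

-- a gap known to be all blank makes the slice test false
theorem pvGap_blank (lines : List String) (p i : Nat)
    (hblank : ∀ j : Nat, p < j → j < i → PySem.Str.strip (lines.getD j "") = "") :
    ((lines.drop (p + 1)).take (i - (p + 1))).any (fun l => PySem.Str.strip l != "") = false := by
  rw [List.any_eq_false]
  intro x hx
  obtain ⟨k, hk, hget⟩ := List.getElem_of_mem hx
  have hk' : k < i - (p + 1) := lt_of_lt_of_le hk (by simp)
  have hklen : p + 1 + k < lines.length := by
    have := hk; simp [List.length_take, List.length_drop] at this; omega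
  have hx' : x = lines[p + 1 + k] := by
    rw [List.getElem_take, List.getElem_drop] at hget; exact hget.symm
  have hb := hblank (p + 1 + k) (by omega) (by omega)
  rw [List.getD_eq_getElem _ _ hklen] at hb
  simp [hx', hb]

-- main invariant: once inside the block (last import p, start s), A's scan
-- equals B's pair-chaining over the remaining import indices
theorem pvLoopA_in_block (lines : List String) : ∀ (ls : List String) (i : Nat), lines.drop i = ls →
    ∀ (s p : Nat), p < i →
    (∀ j : Nat, p < j → j < i → PySem.Str.strip (lines.getD j "") = "") →
    pvLoopA ls i (some s) (some (p + 1)) true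
      = some ((s : Int),
          pvPairLoop lines (pvPairsI (p : Int) ((pvImportsF ls i).map (fun n : Nat => (n : Int)))) ((p : Int) + 1)) := by
  intro ls
  induction ls with
  | nil =>
    intro i _ s p _ _
    simp [pvLoopA, pvImportsF, pvPairsI, pvPairLoop]
    try push_cast
    try ring
  | cons l r ih =>
    intro i hdrop s p hpi hblank
    have hdropr : lines.drop (i + 1) = r := by
      have : lines.drop (i + 1) = (lines.drop i).tail := by
        rw [← List.drop_drop]; simp
      rw [this, hdrop]; rfl
    have hli : lines[i]? = some l := by
      have : (lines.drop i)[0]? = some l := by rw [hdrop]; rfl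
      simpa using this
    have hilen : i < lines.length := by
      have hl := congrArg List.length hdrop
      simp [List.length_drop] at hl
      omega
    by_cases himp : pvIsImport l
    · -- import line: e := i + 1, p := i; the gap (p, i) is blank so B chains
      have hstep : pvLoopA (l :: r) i (some s) (some (p + 1)) true
          = pvLoopA r (i + 1) (some s) (some (i + 1)) true := by
        unfold pvIsImport at himp
        simp only [pvLoopA, himp, if_pos, Option.getD]
      rw [hstep, ih (i + 1) hdropr s i (by omega) (by intro j h1 h2; omega)]
      have hslice : PySem.List.slice lines (some ((p : Int) + 1)) (some (i : Int))
          = (lines.drop (p + 1)).take (i - (p + 1)) := by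
        have : ((p : Int) + 1) = ((p + 1 : Nat) : Int) := by push_cast; ring
        rw [this, PySem.List.slice_natCast]
      have hunf : pvImportsF (l :: r) i = i :: pvImportsF r (i + 1) := by
        simp [pvImportsF, himp]
      rw [hunf, List.map_cons]
      simp only [pvPairsI, pvPairLoop, hslice, pvGap_blank lines p i hblank]
      simp
    · by_cases hbl : PySem.Str.strip l == ""
      · -- blank line: both sides skip it
        have hstep : pvLoopA (l :: r) i (some s) (some (p + 1)) true
            = pvLoopA r (i + 1) (some s) (some (p + 1)) true := by
          unfold pvIsImport at himp
          simp only [pvLoopA]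
          rw [if_neg (by simpa using himp), if_pos hbl]
        have hblank' : ∀ j : Nat, p < j → j < i + 1 → PySem.Str.strip (lines.getD j "") = "" := by
          intro j h1 h2
          rcases Nat.lt_or_ge j i with h | h
          · exact hblank j h1 h
          · have hji : j = i := by omega
            subst hji
            rw [List.getD_eq_getElem _ _ hilen]
            have : lines[j] = l := by
              have := hli; rw [List.getElem?_eq_getElem hilen] at this
              exact Option.some.inj this
            rw [this]; exact eq_of_beq hbl
        rw [hstep, ih (i + 1) hdropr s p (by omega) hblank']
        simp [pvImportsF, himp]
      · -- non-blank non-import: A breaks; B's next gap contains this line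
        have hstep : pvLoopA (l :: r) i (some s) (some (p + 1)) true
            = some ((s : Int), ((p + 1 : Nat) : Int)) := by
          unfold pvIsImport at himp
          simp only [pvLoopA]
          rw [if_neg (by simpa using himp), if_neg (by simpa using hbl)]
          simp
        rw [hstep]
        have hunf2 : pvImportsF (l :: r) i = pvImportsF r (i + 1) := by
          simp [pvImportsF, himp]
        rw [hunf2]
        cases hF : pvImportsF r (i + 1) with
        | nil =>
          simp [pvPairsI, pvPairLoop]
          try push_cast
          try ring
        | cons q rest =>
          have hq : i + 1 ≤ q := pvImportsF_ge r (i + 1) q (by rw [hF]; exact List.mem_cons_self ..)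
          have hslice : PySem.List.slice lines (some ((p : Int) + 1)) (some (q : Int))
              = (lines.drop (p + 1)).take (q - (p + 1)) := by
            have : ((p : Int) + 1) = ((p + 1 : Nat) : Int) := by push_cast; ring
            rw [this, PySem.List.slice_natCast]
          have hmem : l ∈ (lines.drop (p + 1)).take (q - (p + 1)) := by
            have : ((lines.drop (p + 1)).take (q - (p + 1)))[i - (p + 1)]? = some l := by
              rw [List.getElem?_take]
              rw [if_pos (by omega)]
              rw [List.getElem?_drop]
              have : p + 1 + (i - (p + 1)) = i := by omega
              rw [this]; exact hli
            exact List.mem_of_getElem? this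
          have hany : ((lines.drop (p + 1)).take (q - (p + 1))).any
              (fun l => PySem.Str.strip l != "") = true := by
            rw [List.any_eq_true]
            exact ⟨l, hmem, by simpa using hbl⟩
          simp only [List.map_cons, pvPairsI, pvPairLoop, hslice, hany, if_pos]
          push_cast
          ring_nf

-- the locate phase: from the initial state, A equals B's locate-then-chain
theorem pvLoopA_locate (lines : List String) : ∀ (ls : List String) (i : Nat), lines.drop i = ls →
    pvLoopA ls i none none false =
      (match pvImportsF ls i with
       | [] => none
       | s :: rest =>
           some ((s : Int),
             pvPairLoop lines (pvPairsI (s : Int) (rest.map (fun n : Nat => (n : Int)))) ((s : Int) + 1))) := by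
  intro ls
  induction ls with
  | nil => intro i _; simp [pvLoopA, pvImportsF]
  | cons l r ih =>
    intro i hdrop
    have hdropr : lines.drop (i + 1) = r := by
      have : lines.drop (i + 1) = (lines.drop i).tail := by
        rw [← List.drop_drop]; simp
      rw [this, hdrop]; rfl
    by_cases himp : pvIsImport l
    · have hstep : pvLoopA (l :: r) i none none false
          = pvLoopA r (i + 1) (some i) (some (i + 1)) true := by
        unfold pvIsImport at himp
        simp only [pvLoopA, himp, if_pos, Option.getD]
      rw [hstep, pvLoopA_in_block lines r (i + 1) hdropr i i (by omega) (by intro j h1 h2; omega)]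
      simp [pvImportsF, himp]
    · have hstep : pvLoopA (l :: r) i none none false = pvLoopA r (i + 1) none none false := by
        unfold pvIsImport at himp
        simp only [pvLoopA]
        rw [if_neg (by simpa using himp)]
        by_cases hbl : PySem.Str.strip l == ""
        · rw [if_pos hbl]
        · rw [if_neg hbl]; rfl
      rw [hstep, ih (i + 1) hdropr]
      simp [pvImportsF, himp]

-- ===== VERDICT (by name: the statement is the Claim_ definition above) =====
theorem find_import_block_spec : Claim_equal_find_import_block := by
  intro lines _
  unfold Spec_find_import_block find_import_block find_import_block_alt pvImports
  rw [pvLoopA_locate lines lines 0 (by simp)]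
  have himp : ((PySem.List.enumerate lines).filter (fun p => pvIsImport p.2)).map (·.1)
      = (pvImportsF lines 0).map (fun n : Nat => (n : Int)) := by
    have := pvImports_eq lines 0
    simpa using this
  rw [himp]
  cases hF : pvImportsF lines 0 with
  | nil => simp
  | cons s rest =>
    simp only [List.map_cons]
    rw [pvZip_eq_pairsI]
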